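-- pv_equiv track=rewrite | github.com/NorahYujieZhao/PRO-V | sim/output_tb_gen_tb_20250406/49/stimulus.py | _generate_bit_string
-- ===== SOURCE A (Python) =====
-- def _generate_bit_string(length: int, pattern: str) -> str:
--     if pattern == 'all_zeros':
--         return '0' * length
--     elif pattern == 'all_ones':
--         return '1' * length
--     elif pattern == 'alternating':
--         return ''.join(['1' if i % 2 == 0 else '0' for i in range(length)])
--     elif pattern == 'sparse':
--         return ''.join(['1' if i % 8 == 0 else '0' for i in range(length)])
-- ===== SOURCE B (Python) =====
-- def _generate_bit_string(length: int, pattern: str) -> str: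
--     if pattern == 'all_zeros':
--         return '0' * length
--     elif pattern == 'all_ones':
--         return '1' * length
--     elif pattern == 'alternating':
--         return ('10' * ((length + 1) // 2))[:length]
--     elif pattern == 'sparse':
--         return (('1' + '0' * 7) * ((length + 7) // 8))[:length]
-- ===== Notes on version B (the rewrite author's own statement) =====
-- stated objective: alternative
-- what changed: alternating/sparse are built by tiling a fixed period string ('10', '1'+'0'*7) and slicing to length instead of a per-index loop over range(length) testing i % k.
import Mathlib
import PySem

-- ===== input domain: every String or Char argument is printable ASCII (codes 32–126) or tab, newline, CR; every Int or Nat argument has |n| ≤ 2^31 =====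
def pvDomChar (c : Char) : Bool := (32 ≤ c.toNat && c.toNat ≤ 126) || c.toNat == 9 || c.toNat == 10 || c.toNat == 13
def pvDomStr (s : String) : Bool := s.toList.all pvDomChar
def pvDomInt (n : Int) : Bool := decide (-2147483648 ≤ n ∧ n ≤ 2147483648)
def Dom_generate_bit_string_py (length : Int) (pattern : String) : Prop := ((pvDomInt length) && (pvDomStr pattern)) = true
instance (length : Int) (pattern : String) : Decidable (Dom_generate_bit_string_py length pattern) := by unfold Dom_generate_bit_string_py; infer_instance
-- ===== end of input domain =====

-- B builds alternating/sparse by tiling a fixed period string and slicing to length instead of a per-index loop.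
-- A returns None when pattern is none of the four names; both ports return none there.

-- ===== PORT A =====
-- '0' * length : Python string repetition; non-positive count gives '' , exactly List.replicate length.toNat.
-- ''.join([...]) of one-char strings over range(length) = String.ofList of the map over PySem.List.pyRange.
def generate_bit_string_py (length : Int) (pattern : String) : Option String :=
  if pattern = "all_zeros" then
    some (String.ofList (List.replicate length.toNat '0'))
  else if pattern = "all_ones" then
    some (String.ofList (List.replicate length.toNat '1'))
  else if pattern = "alternating" then
    some (String.ofList ((PySem.List.pyRange 0 length 1).map
      (fun i => if PySem.Int.mod i 2 = 0 then '1' else '0')))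
  else if pattern = "sparse" then
    some (String.ofList ((PySem.List.pyRange 0 length 1).map
      (fun i => if PySem.Int.mod i 8 = 0 then '1' else '0')))
  else none

-- ===== PORT B =====
-- s * n : Python string repetition (non-positive n gives ''), exact as flatten of replicate n.toNat.
def pvTile (block : List Char) (n : Int) : List Char :=
  (List.replicate n.toNat block).flatten

def generate_bit_string_py_alt (length : Int) (pattern : String) : Option String :=
  if pattern = "all_zeros" then
    some (String.ofList (List.replicate length.toNat '0'))
  else if pattern = "all_ones" then
    some (String.ofList (List.replicate length.toNat '1'))
  else if pattern = "alternating" then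
    some (String.ofList (PySem.List.slice
      (pvTile ['1', '0'] (PySem.Int.floordiv (length + 1) 2)) none (some length)))
  else if pattern = "sparse" then
    some (String.ofList (PySem.List.slice
      (pvTile ['1', '0', '0', '0', '0', '0', '0', '0'] (PySem.Int.floordiv (length + 7) 8))
      none (some length)))
  else none

-- ===== PRECONDITION & SPEC =====
def Spec_generate_bit_string_py (length : Int) (pattern : String) (out : Option String) : Prop := out = generate_bit_string_py_alt length pattern
instance (length : Int) (pattern : String) (out : Option String) : Decidable (Spec_generate_bit_string_py length pattern out) := by unfold Spec_generate_bit_string_py; infer_instance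

-- ===== CLAIM (what is proved, stated in full; the proofs are below) =====
def Claim_equal_generate_bit_string_py : Prop := ∀ (length : Int) (pattern : String), Dom_generate_bit_string_py length pattern → Spec_generate_bit_string_py length pattern (generate_bit_string_py length pattern)

-- ===== LEMMAS AND PROOFS =====

-- the period block '1' :: '0'*(p-1) is the map of the index predicate over one period
lemma pv_map_range_period (p : Nat) (hp : 0 < p) :
    (List.range p).map (fun k => if k % p = 0 then '1' else '0')
      = '1' :: List.replicate (p - 1) '0' := by
  obtain ⟨m, rfl⟩ := Nat.exists_eq_add_of_lt hp
  simp only [Nat.zero_add, List.range_succ_eq_map, List.map_cons, List.map_map]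
  congr 1
  rw [List.eq_replicate_iff]
  refine ⟨by simp, ?_⟩
  intro c hc
  simp only [List.mem_map, List.mem_range, Function.comp] at hc
  obtain ⟨j, hj, rfl⟩ := hc
  have : (j + 1) % (m + 1) = j + 1 := Nat.mod_eq_of_lt (by omega)
  simp [this]

-- tiling k blocks is the index-predicate map over a range of k*p
lemma pv_tile_eq_map_range (p : Nat) (hp : 0 < p) (k : Nat) :
    (List.replicate k ('1' :: List.replicate (p - 1) '0')).flatten
      = (List.range (k * p)).map (fun i => if i % p = 0 then '1' else '0') := by
  induction k with
  | zero => simp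
  | succ k ih =>
    rw [List.replicate_succ', List.flatten_append, ih]
    have hkp : (k + 1) * p = k * p + p := by ring
    rw [hkp, List.range_add, List.map_append, List.map_map]
    congr 1
    have hco : ((fun i => if i % p = 0 then '1' else '0') ∘ (k * p + ·))
        = (fun i => if i % p = 0 then '1' else '0') := by
      funext i
      simp [Function.comp]
    rw [hco, pv_map_range_period p hp]
    simp

-- Nat core: the index-predicate map over range n equals the ceil(n/p)-fold tile truncated to n
lemma pv_nat_core (p : Nat) (hp : 0 < p) (n : Nat) :
    (List.range n).map (fun i => if i % p = 0 then '1' else '0')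
      = ((List.replicate ((n + (p - 1)) / p) ('1' :: List.replicate (p - 1) '0')).flatten).take n := by
  rw [pv_tile_eq_map_range p hp, ← List.map_take, List.take_range]
  have h1 := Nat.div_add_mod (n + (p - 1)) p
  have h2 : (n + (p - 1)) % p < p := Nat.mod_lt _ hp
  have hq : n ≤ (n + (p - 1)) / p * p := by rw [Nat.mul_comm]; omega
  rw [Nat.min_eq_left hq]

-- Int-level lemma for one looped branch (p the period, as a Nat)
lemma pv_branch (p : Nat) (hp : 0 < p) (length : Int) :
    (PySem.List.pyRange 0 length 1).map
        (fun i => if PySem.Int.mod i (p : Int) = 0 then '1' else '0')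
      = PySem.List.slice (pvTile ('1' :: List.replicate (p - 1) '0')
          (PySem.Int.floordiv (length + ((p : Int) - 1)) p)) none (some length) := by
  have hpz : (0 : Int) < (p : Int) := by exact_mod_cast hp
  by_cases hpos : 0 < length
  · obtain ⟨n, rfl⟩ : ∃ n : Nat, length = (n : Int) := ⟨length.toNat, by omega⟩
    have hcast : (n : Int) + ((p : Int) - 1) = ((n + (p - 1) : Nat) : Int) := by
      push_cast [Nat.cast_sub hp]; ring
    have hfl : PySem.Int.floordiv ((n : Int) + ((p : Int) - 1)) p
        = (((n + (p - 1)) / p : Nat) : Int) := by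
      rw [hcast]; exact PySem.Int.floordiv_natCast _ _
    have hn0 : ((n : Int) - 0).toNat = n := by omega
    rw [PySem.List.pyRange_one, hn0, PySem.List.slice_to_natCast, hfl, pvTile]
    have htn : (((n + (p - 1)) / p : Nat) : Int).toNat = (n + (p - 1)) / p :=
      Int.toNat_natCast _
    rw [htn, List.map_map, ← pv_nat_core p hp n]
    apply List.map_congr_left
    intro k _
    have hm : PySem.Int.mod ((0 : Int) + (k : Int)) (p : Int) = ((k % p : Nat) : Int) := by
      rw [zero_add]; exact PySem.Int.mod_natCast _ _
    simp only [Function.comp, hm]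
    by_cases h : k % p = 0 <;> simp [h, Int.natCast_dvd_natCast, Nat.dvd_iff_mod_eq_zero]
  · -- empty on both sides
    have hr : PySem.List.pyRange 0 length 1 = [] := by
      rw [PySem.List.pyRange_one]
      have h0 : (length - 0).toNat = 0 := by omega
      rw [h0]
      rfl
    have hf : PySem.Int.floordiv (length + ((p : Int) - 1)) p < 1 := by
      rw [PySem.Int.floordiv_lt_iff_lt_mul]
      · omega
      · exact hpz
    have htn : (PySem.Int.floordiv (length + ((p : Int) - 1)) p).toNat = 0 := by omega
    simp [hr, pvTile, htn, PySem.List.slice]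

-- the two branch instances, stated in exactly the ports' terms
lemma pv_branch2 (length : Int) :
    (PySem.List.pyRange 0 length 1).map
        (fun i => if PySem.Int.mod i 2 = 0 then '1' else '0')
      = PySem.List.slice (pvTile ['1', '0'] (PySem.Int.floordiv (length + 1) 2)) none (some length) := by
  have h := pv_branch 2 (by norm_num) length
  norm_num at h
  have hfd : PySem.Int.floordiv (length + 1) 2 = (length + 1) / 2 := by
    rw [PySem.Int.floordiv_eq_ediv_of_pos]
    norm_num
  simp only [PySem.Int.mod_eq_zero_iff_dvd, hfd]
  exact h

lemma pv_branch8 (length : Int) :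
    (PySem.List.pyRange 0 length 1).map
        (fun i => if PySem.Int.mod i 8 = 0 then '1' else '0')
      = PySem.List.slice (pvTile ['1', '0', '0', '0', '0', '0', '0', '0']
          (PySem.Int.floordiv (length + 7) 8)) none (some length) := by
  have h := pv_branch 8 (by norm_num) length
  norm_num at h
  have hb : ('1' :: List.replicate 7 '0' : List Char) = ['1', '0', '0', '0', '0', '0', '0', '0'] := rfl
  rw [hb] at h
  have hfd : PySem.Int.floordiv (length + 7) 8 = (length + 7) / 8 := by
    rw [PySem.Int.floordiv_eq_ediv_of_pos]
    norm_num
  simp only [PySem.Int.mod_eq_zero_iff_dvd, hfd]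
  exact h

-- ===== VERDICT (by name: the statement is the Claim_ definition above) =====
theorem generate_bit_string_py_spec : Claim_equal_generate_bit_string_py := by
  intro length pattern _
  unfold Spec_generate_bit_string_py generate_bit_string_py generate_bit_string_py_alt
  split_ifs with h1 h2 h3 h4
  · rfl
  · rfl
  · exact congrArg (fun l => some (String.ofList l)) (pv_branch2 length)
  · exact congrArg (fun l => some (String.ofList l)) (pv_branch8 length)
  · rfl
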